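-- pv_equiv track=rewrite | github.com/TeeKay-FourTwentyOne/math | ramsey-book-graphs/sampling_aflat_d11.py | symmetric_pairs
-- ===== SOURCE A (Python) =====
-- def symmetric_pairs(p):
--     """Return list of {d, p-d} pairs for d=1..p-1."""
--     pairs = []
--     seen = set()
--     for d in range(1, p):
--         if d not in seen:
--             comp = (p - d) % p
--             pairs.append((d, comp))
--             seen.add(d)
--             seen.add(comp)
--     return pairs
-- ===== SOURCE B (Python) =====
-- def symmetric_pairs(p):
--     """Return list of {d, p-d} pairs for d=1..p-1."""
--     return [(d, p - d) for d in range(1, p // 2 + 1)]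
-- ===== Notes on version B (the rewrite author's own statement) =====
-- stated objective: faster
-- what changed: Replaces A's full scan over all residues with a seen-set dedup by a direct comprehension over only the lower half of the range, dropping the set and its membership tests; the redundant modulo on the complement simplifies away.
import Mathlib
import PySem

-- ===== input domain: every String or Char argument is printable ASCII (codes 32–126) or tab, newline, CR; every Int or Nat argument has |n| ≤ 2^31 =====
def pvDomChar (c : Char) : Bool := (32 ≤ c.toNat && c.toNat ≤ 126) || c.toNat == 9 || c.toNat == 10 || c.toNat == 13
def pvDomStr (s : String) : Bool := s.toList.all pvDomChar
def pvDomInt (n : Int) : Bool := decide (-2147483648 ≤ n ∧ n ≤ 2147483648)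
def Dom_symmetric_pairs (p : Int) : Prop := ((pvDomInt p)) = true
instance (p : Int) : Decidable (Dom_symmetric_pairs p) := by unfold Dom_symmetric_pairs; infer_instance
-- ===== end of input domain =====

-- B replaces A's full scan with a seen-set by a direct comprehension over the lower half of the range (no set, half the iterations).

-- ===== PORT A =====
-- loop body of A: if d not in seen: append (d, (p-d)%p); seen.add(d); seen.add(comp)
def spStep (p : Int) (st : List (Int × Int) × PySem.Set Int) (d : Int) :
    List (Int × Int) × PySem.Set Int :=
  if PySem.Set.contains st.2 d = false then
    let comp := PySem.Int.mod (p - d) p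
    (st.1 ++ [(d, comp)], PySem.Set.add (PySem.Set.add st.2 d) comp)
  else st

def symmetric_pairs (p : Int) : List (Int × Int) :=
  ((PySem.List.pyRange 1 p 1).foldl (spStep p) ([], PySem.Set.empty)).1

-- ===== PORT B =====
def symmetric_pairs_alt (p : Int) : List (Int × Int) :=
  (PySem.List.pyRange 1 (PySem.Int.floordiv p 2 + 1) 1).map (fun d => (d, p - d))

-- ===== PRECONDITION & SPEC =====
def Spec_symmetric_pairs (p : Int) (out : List (Int × Int)) : Prop := out = symmetric_pairs_alt p
instance (p : Int) (out : List (Int × Int)) : Decidable (Spec_symmetric_pairs p out) := by unfold Spec_symmetric_pairs; infer_instance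

-- ===== CLAIM (what is proved, stated in full; the proofs are below) =====
def Claim_equal_symmetric_pairs : Prop := ∀ (p : Int), Dom_symmetric_pairs p → Spec_symmetric_pairs p (symmetric_pairs p)

-- ===== LEMMAS AND PROOFS =====

-- First half of A's loop (d = 1..k ≤ p//2): pairs are the closed form, and the seen set
-- contains exactly {1..k} ∪ {p-k..p-1}.
theorem sp_half1 (p : Int) (hp : 2 ≤ p) (k : Nat) (hk : (k : Int) ≤ p / 2) :
    ((PySem.List.pyRange 1 ((k : Int) + 1) 1).foldl (spStep p) ([], PySem.Set.empty)).1
      = (PySem.List.pyRange 1 ((k : Int) + 1) 1).map (fun d => (d, p - d)) ∧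
    ∀ x : Int, x ∈ ((PySem.List.pyRange 1 ((k : Int) + 1) 1).foldl (spStep p) ([], PySem.Set.empty)).2
      ↔ ((1 ≤ x ∧ x ≤ (k : Int)) ∨ (p - (k : Int) ≤ x ∧ x ≤ p - 1)) := by
  induction k with
  | zero =>
    rw [PySem.List.pyRange_one_eq_nil (by omega)]
    constructor
    · rfl
    · intro x
      simp [PySem.Set.empty]
      omega
  | succ k ih =>
    have hk' : (k : Int) ≤ p / 2 := by push_cast at hk ⊢; omega
    obtain ⟨ih1, ih2⟩ := ih hk'
    have hsplit : PySem.List.pyRange 1 ((k : Int) + 1 + 1) 1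
        = PySem.List.pyRange 1 ((k : Int) + 1) 1 ++ [(k : Int) + 1] := by
      exact PySem.List.pyRange_one_succ_right (by omega)
    have hc : ((k : Int) + 1) ∉
        ((PySem.List.pyRange 1 ((k : Int) + 1) 1).foldl (spStep p) ([], PySem.Set.empty)).2 := by
      rw [ih2]
      push_cast at hk
      omega
    have hcb : PySem.Set.contains
        ((PySem.List.pyRange 1 ((k : Int) + 1) 1).foldl (spStep p) ([], PySem.Set.empty)).2
        ((k : Int) + 1) = false := by
      simp only [PySem.Set.contains_eq_listContains]
      simpa using hc
    have hmod : PySem.Int.mod (p - ((k : Int) + 1)) p = p - ((k : Int) + 1) := by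
      have hb1 : (0 : Int) ≤ p - ((k : Int) + 1) := by push_cast at hk; omega
      have hb2 : p - ((k : Int) + 1) < p := by omega
      rw [PySem.Int.mod_eq_emod_of_pos (by omega)]
      exact Int.emod_eq_of_lt hb1 hb2
    push_cast
    rw [hsplit, List.foldl_append, List.map_append]
    simp only [List.foldl, spStep, hcb, hmod, reduceIte]
    constructor
    · rw [ih1]
      rfl
    · intro x
      simp only [PySem.Set.mem_add, ih2]
      push_cast at hk
      omega

-- Second half of A's loop: every d already in seen, so the fold is the identity.
theorem sp_noop (p : Int) (l : List Int) (st : List (Int × Int) × PySem.Set Int)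
    (h : ∀ d ∈ l, PySem.Set.contains st.2 d = true) :
    l.foldl (spStep p) st = st := by
  induction l with
  | nil => rfl
  | cons d l ih =>
    have hd : spStep p st d = st := by
      have hc := h d (List.mem_cons_self ..)
      simp only [spStep, hc]
      simp
    rw [List.foldl_cons, hd]
    exact ih (fun e he => h e (by simp [he]))

-- ===== VERDICT (by name: the statement is the Claim_ definition above) =====
theorem symmetric_pairs_spec : Claim_equal_symmetric_pairs := by
  intro p _
  unfold Spec_symmetric_pairs symmetric_pairs symmetric_pairs_alt
  rw [PySem.Int.floordiv_eq_ediv_of_pos (by omega : (0:Int) < 2)]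
  by_cases hp : 2 ≤ p
  · set h : Int := p / 2 with hh
    have hk0 : 0 ≤ h := by omega
    obtain ⟨h1, h2⟩ := sp_half1 p hp h.toNat (by omega)
    have hcast : ((h.toNat : Int)) = h := Int.toNat_of_nonneg hk0
    rw [hcast] at h1 h2
    have hsplit : PySem.List.pyRange 1 p 1
        = PySem.List.pyRange 1 (h + 1) 1 ++ PySem.List.pyRange (h + 1) p 1 :=
      PySem.List.pyRange_one_append 1 (h + 1) p (by omega) (by omega)
    rw [hsplit, List.foldl_append]
    rw [sp_noop p _ _ (by
      intro d hd
      rw [PySem.List.mem_pyRange_one] at hd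
      rw [PySem.Set.contains_iff, h2]
      omega)]
    exact h1
  · rw [PySem.List.pyRange_one_eq_nil (by omega : p ≤ 1),
        PySem.List.pyRange_one_eq_nil (by omega : p / 2 + 1 ≤ 1)]
    rfl
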